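-- pv_equiv track=rewrite | github.com/forestrie/univocity | scripts/wrap_comments.py | find_soft_break
-- ===== SOURCE A (Python) =====
-- def find_soft_break(text: str, max_len: int, min_break: int = 0) -> int:
--     """Prefer last punctuation (.,;:) at or before max_len, else last space. Never break before min_break."""
--     if len(text) <= max_len:
--         return len(text)
--     search = text[: max_len + 1]
--     for p in ('.', ',', ';', ':', ' '):
--         idx = search.rfind(p)
--         if idx > 0 and idx >= min_break:
--             return idx + 1
--     return max(max_len, min_break)
-- ===== SOURCE B (Python) =====
-- def find_soft_break(text: str, max_len: int, min_break: int = 0) -> int: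
--     """Prefer last punctuation (.,;:) at or before max_len, else last space. Never break before min_break."""
--     n = len(text)
--     if n <= max_len:
--         return n
--     search = text[: max_len + 1]
--     lo = max(1, min_break)
--     seen = {}
--     for i in range(len(search) - 1, lo - 1, -1):
--         c = search[i]
--         if c == '.':
--             return i + 1
--         if c in ',;: ' and c not in seen:
--             seen[c] = i
--     for p in ',;: ':
--         if p in seen:
--             return seen[p] + 1
--     return max(max_len, min_break)
-- ===== Notes on version B (the rewrite author's own statement) =====
-- stated objective: alternative
-- what changed: Instead of five full rfind scans (one per break character in priority order), B makes a single right-to-left scan restricted to the qualifying index region [max(1,min_break), max_len], returning immediately at the first '.' and recording the first-seen (rightmost) position of each lower-priority break character for one final priority check.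
import Mathlib
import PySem

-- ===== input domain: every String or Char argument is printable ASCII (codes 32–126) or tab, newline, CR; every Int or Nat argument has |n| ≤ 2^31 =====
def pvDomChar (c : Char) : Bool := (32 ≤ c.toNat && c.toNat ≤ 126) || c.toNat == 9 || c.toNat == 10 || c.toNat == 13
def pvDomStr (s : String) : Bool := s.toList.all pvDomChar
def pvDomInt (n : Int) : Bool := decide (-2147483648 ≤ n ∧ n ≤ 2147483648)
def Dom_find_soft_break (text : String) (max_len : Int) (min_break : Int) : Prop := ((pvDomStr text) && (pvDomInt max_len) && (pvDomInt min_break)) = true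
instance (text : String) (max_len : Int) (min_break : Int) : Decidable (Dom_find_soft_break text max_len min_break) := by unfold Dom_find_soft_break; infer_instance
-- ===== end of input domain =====

-- B replaces A's five full rfind scans by ONE right-to-left scan limited to the qualifying
-- region (indices ≥ max(1, min_break)), returning immediately on '.', and recording the
-- first-seen (= rightmost) position of each lower-priority break char (objective: alternative).

-- ===== PORT A =====
-- A's 'for p in ('.', ',', ';', ':', ' ')' loop with early return, as structural recursion
def fsbLoopA (search : String) (min_break : Int) (max_len : Int) : List Char → Int
  | [] => max max_len min_break
  | p :: ps =>
    let idx := PySem.Str.rfind search (String.ofList [p])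
    if idx > 0 ∧ idx ≥ min_break then idx + 1 else fsbLoopA search min_break max_len ps

def find_soft_break (text : String) (max_len : Int) (min_break : Int) : Int :=
  if PySem.Str.len text ≤ max_len then PySem.Str.len text
  else
    let search := PySem.Str.slice text none (some (max_len + 1))
    fsbLoopA search min_break max_len ['.', ',', ';', ':', ' ']

-- ===== PORT B =====
-- B's trailing 'for p in ',;: '' loop over the recorded first-seen positions
def fsbLoop2 (seen : PySem.Dict Char Int) (max_len : Int) (min_break : Int) : List Char → Int
  | [] => max max_len min_break
  | p :: ps =>
    match seen.get? p with
    | some v => v + 1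
    | none => fsbLoop2 seen max_len min_break ps

-- B's 'for i in range(len(search)-1, lo-1, -1)' scan with early return on '.'
def fsbScan (search : List Char) (max_len : Int) (min_break : Int)
    (seen : PySem.Dict Char Int) : List Int → Int
  | [] => fsbLoop2 seen max_len min_break [',', ';', ':', ' ']
  | i :: is =>
    match PySem.List.pyGet? search i with
    | none => 0  -- unreachable: every index produced by the range is in bounds (totality guard)
    | some c =>
      if c = '.' then i + 1
      else if (c = ',' ∨ c = ';' ∨ c = ':' ∨ c = ' ') ∧ seen.get? c = none then
        fsbScan search max_len min_break (seen.insert c i) is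
      else
        fsbScan search max_len min_break seen is

def find_soft_break_alt (text : String) (max_len : Int) (min_break : Int) : Int :=
  let n := PySem.Str.len text
  if n ≤ max_len then n
  else
    let search := PySem.List.slice text.toList none (some (max_len + 1))
    let lo := max 1 min_break
    fsbScan search max_len min_break PySem.Dict.empty
      (PySem.List.pyRange ((search.length : Int) - 1) (lo - 1) (-1))

-- ===== PRECONDITION & SPEC =====
def Spec_find_soft_break (text : String) (max_len : Int) (min_break : Int) (out : Int) : Prop := out = find_soft_break_alt text max_len min_break
instance (text : String) (max_len : Int) (min_break : Int) (out : Int) : Decidable (Spec_find_soft_break text max_len min_break out) := by unfold Spec_find_soft_break; infer_instance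

-- ===== CLAIM (what is proved, stated in full; the proofs are below) =====
def Claim_equal_find_soft_break : Prop := ∀ (text : String) (max_len : Int) (min_break : Int), Dom_find_soft_break text max_len min_break → Spec_find_soft_break text max_len min_break (find_soft_break text max_len min_break)

-- ===== LEMMAS AND PROOFS =====

-- reference value: the last index of c in l, or -1 (Python's rfind of a single char)
def rlast : List Char → Char → Int
  | [], _ => -1
  | x :: xs, c =>
    let r := rlast xs c
    if r = -1 then (if x = c then 0 else -1) else r + 1

theorem rlast_ge (l : List Char) (c : Char) : -1 ≤ rlast l c := by
  induction l with
  | nil => simp [rlast]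
  | cons x xs ih => simp only [rlast]; split_ifs <;> omega

theorem rlast_lt_length (l : List Char) (c : Char) : rlast l c < (l.length : Int) := by
  induction l with
  | nil => simp [rlast]
  | cons x xs ih => simp only [rlast, List.length_cons]; split_ifs <;> push_cast <;> omega

theorem rlast_append (xs : List Char) (x c : Char) :
    rlast (xs ++ [x]) c = if x = c then (xs.length : Int) else rlast xs c := by
  induction xs with
  | nil => simp [rlast]
  | cons y ys ih =>
    have hge := rlast_ge ys c
    simp only [List.cons_append, rlast, ih, List.length_cons]
    split_ifs <;> first | omega | exact False.elim (by assumption)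

theorem le_rlast_of_getElem (l : List Char) (c : Char) (k : Nat) (hk : k < l.length)
    (h : l[k] = c) : (k : Int) ≤ rlast l c := by
  induction l generalizing k with
  | nil => simp at hk
  | cons x xs ih =>
    have hge := rlast_ge xs c
    cases k with
    | zero =>
      simp only [List.getElem_cons_zero] at h
      simp only [rlast, h]
      split_ifs <;> omega
    | succ k =>
      have hk' : k < xs.length := by simpa using hk
      have := ih k hk' (by simpa using h)
      simp only [rlast]
      split_ifs <;> push_cast <;> omega

theorem rlast_getElem? (l : List Char) (c : Char) (i : Int) (h0 : 0 ≤ i)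
    (h : rlast l c = i) : l[i.toNat]? = some c := by
  induction l generalizing i with
  | nil => simp [rlast] at h; omega
  | cons x xs ih =>
    have hge := rlast_ge xs c
    simp only [rlast] at h
    by_cases hr : rlast xs c = -1
    · rw [if_pos hr] at h
      by_cases hx : x = c
      · rw [if_pos hx] at h
        have : i = 0 := by omega
        subst this; simp [hx]
      · rw [if_neg hx] at h; omega
    · rw [if_neg hr] at h
      have h1 : rlast xs c = i - 1 := by omega
      have h2 : 0 ≤ i - 1 := by omega
      have := ih (i - 1) h2 h1
      have hti : i.toNat = (i - 1).toNat + 1 := by omega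
      rw [hti]
      simpa using this

-- A's per-char test 'idx > 0 and idx >= min_break' as a pure function of rlast
def refLoop (search : List Char) (lo : Int) (max_len : Int) (min_break : Int) : List Char → Int
  | [] => max max_len min_break
  | p :: ps =>
    if lo ≤ rlast search p then rlast search p + 1
    else refLoop search lo max_len min_break ps

theorem go_spec (s : List Char) (c : Char) (j : Nat) (hj : j < s.length) :
    PySem.Chars.rfind.go s [c] j = rlast (s.take (j + 1)) c := by
  induction j with
  | zero =>
    obtain ⟨x, xs, rfl⟩ : ∃ x xs, s = x :: xs := by
      cases s with
      | nil => simp at hj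
      | cons a as => exact ⟨a, as, rfl⟩
    rw [show PySem.Chars.rfind.go (x :: xs) [c] 0
        = if [c].isPrefixOf (x :: xs) then 0 else -1 from rfl]
    simp only [List.isPrefixOf, Bool.and_true, List.take_succ_cons, List.take_zero, rlast]
    by_cases hx : x = c
    · simp [hx]
    · simp [hx, Ne.symm hx]
  | succ j ih =>
    have hj' : j < s.length := by omega
    have htake : s.take (j + 1 + 1) = s.take (j + 1) ++ [s[j + 1]] := by
      rw [List.take_add_one, List.getElem?_eq_getElem hj]
      simp
    have hdrop : s.drop (j + 1) = s[j + 1] :: s.drop (j + 2) := by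
      rw [List.drop_eq_getElem_cons hj]
    have hlen : (s.take (j + 1)).length = j + 1 := by
      simp; omega
    rw [show PySem.Chars.rfind.go s [c] (j + 1)
        = if [c].isPrefixOf (List.drop (j + 1) s) then ((j : Int) + 1) else PySem.Chars.rfind.go s [c] j
      from rfl]
    rw [htake, rlast_append, ih hj', hdrop]
    simp only [List.isPrefixOf, Bool.and_true]
    by_cases h : s[j + 1] = c
    · simp [h, hlen]
    · simp [h, Ne.symm h]

theorem rfind_single (s : List Char) (c : Char) :
    PySem.Chars.rfind s [c] = rlast s c := by
  cases s with
  | nil => rfl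
  | cons x xs =>
    have hstep : PySem.Chars.rfind.go (x :: xs) [c] (xs.length + 1)
        = PySem.Chars.rfind.go (x :: xs) [c] xs.length := by
      rw [show PySem.Chars.rfind.go (x :: xs) [c] (xs.length + 1)
          = if [c].isPrefixOf (List.drop (xs.length + 1) (x :: xs)) then ((xs.length : Int) + 1)
            else PySem.Chars.rfind.go (x :: xs) [c] xs.length from rfl]
      simp
    have h := go_spec (x :: xs) c xs.length (by simp)
    rw [List.take_of_length_le (by simp)] at h
    show PySem.Chars.rfind.go (x :: xs) [c] (x :: xs).length = rlast (x :: xs) c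
    rw [show (x :: xs).length = xs.length + 1 from rfl, hstep, h]

theorem loopA_eq_refLoop (search : String) (min_break max_len : Int) (ps : List Char) :
    fsbLoopA search min_break max_len ps
      = refLoop search.toList (max 1 min_break) max_len min_break ps := by
  induction ps with
  | nil => rfl
  | cons p rest ih =>
    simp only [fsbLoopA, refLoop, PySem.Str.rfind_eq]
    rw [show (String.ofList [p]).toList = [p] by simp, rfind_single]
    have : (rlast search.toList p > 0 ∧ rlast search.toList p ≥ min_break)
        ↔ max 1 min_break ≤ rlast search.toList p := by omega
    split_ifs with h1 h2 h2 <;> first | rfl | exact absurd (this.mp h1) h2 | exact absurd (this.mpr h2) h1 | exact ih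

theorem loop2_eq_refLoop (search : List Char) (lo max_len min_break : Int)
    (seen : PySem.Dict Char Int) (ps : List Char)
    (h : ∀ p ∈ ps, seen.get? p
        = if lo ≤ rlast search p then some (rlast search p) else none) :
    fsbLoop2 seen max_len min_break ps = refLoop search lo max_len min_break ps := by
  induction ps with
  | nil => rfl
  | cons p rest ih =>
    have hp := h p (by simp)
    simp only [fsbLoop2, refLoop]
    split_ifs at hp ⊢ with hc
    · rw [hp]
    · rw [hp]; exact ih (fun q hq => h q (by simp [hq]))


theorem scan_spec (search : List Char) (max_len min_break lo : Int)
    (hlo : lo = max 1 min_break) :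
    ∀ (n : Nat) (i : Int) (seen : PySem.Dict Char Int),
      i = lo - 1 + n → i ≤ (search.length : Int) - 1 →
      rlast search '.' ≤ i →
      (∀ p, (p = ',' ∨ p = ';' ∨ p = ':' ∨ p = ' ') →
        seen.get? p = if i < rlast search p then some (rlast search p) else none) →
      fsbScan search max_len min_break seen (PySem.List.pyRange i (lo - 1) (-1))
        = refLoop search lo max_len min_break ['.', ',', ';', ':', ' '] := by
  intro n
  induction n with
  | zero =>
    intro i seen hi _ hdot hseen
    have hi0 : i = lo - 1 := by omega
    rw [PySem.List.pyRange_neg_one_eq_nil (by omega)]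
    simp only [fsbScan, refLoop]
    rw [if_neg (by omega)]
    exact loop2_eq_refLoop _ _ _ _ _ _
      (fun p hp => by rw [hseen p (by simpa using hp)]; split_ifs <;> first | rfl | omega)
  | succ n ih =>
    intro i seen hi hilen hdot hseen
    have hgt : lo - 1 < i := by omega
    have h0i : 0 ≤ i := by omega
    have hilt : i < (search.length : Int) := by omega
    rw [PySem.List.pyRange_neg_one_cons hgt]
    have hget : PySem.List.pyGet? search i = some search[i.toNat] :=
      PySem.List.pyGet?_eq_some_getElem search h0i hilt
    have hti : (i.toNat : Int) = i := by omega
    have hat : ((i.toNat : Int)) ≤ rlast search search[i.toNat] :=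
      le_rlast_of_getElem search _ i.toNat (by omega) rfl
    rw [hti] at hat
    simp only [fsbScan, hget]
    by_cases hc : search[i.toNat] = '.'
    · rw [if_pos hc]
      rw [hc] at hat
      have : rlast search '.' = i := le_antisymm hdot hat
      simp only [refLoop]
      rw [if_pos (by omega), this]
    · rw [if_neg hc]
      -- search[i] ≠ '.' so rlast '.' ≠ i
      have hdot' : rlast search '.' ≤ i - 1 := by
        rcases lt_or_eq_of_le hdot with h | h
        · omega
        · exfalso
          have hgp := rlast_getElem? search '.' i h0i h
          rw [List.getElem?_eq_getElem (by omega)] at hgp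
          exact hc (by injection hgp)
      -- a char p ≠ search[i] cannot have rlast = i
      have hne : ∀ p, rlast search p = i → search[i.toNat] = p := by
        intro p h
        have hgp := rlast_getElem? search p i h0i h
        rw [List.getElem?_eq_getElem (by omega)] at hgp
        injection hgp
      by_cases hcond : (search[i.toNat] = ',' ∨ search[i.toNat] = ';' ∨
          search[i.toNat] = ':' ∨ search[i.toNat] = ' ') ∧ seen.get? search[i.toNat] = none
      · rw [if_pos hcond]
        obtain ⟨hmem, hnone⟩ := hcond
        have h1 := hseen _ hmem
        rw [hnone] at h1
        have hle : rlast search search[i.toNat] ≤ i := by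
          by_contra h
          rw [if_pos (by omega)] at h1
          simp at h1
        have heq : rlast search search[i.toNat] = i := le_antisymm hle hat
        apply ih (i - 1) _ (by omega) (by omega) hdot'
        intro p hp
        by_cases hpc : p = search[i.toNat]
        · subst hpc
          rw [PySem.Dict.get?_insert_self]
          rw [if_pos (by omega)]
          rw [heq]
        · rw [PySem.Dict.get?_insert_of_ne _ _ hpc]
          rw [hseen p hp]
          have : rlast search p ≠ i := fun h => hpc (hne p h).symm
          split_ifs <;> first | rfl | omega
      · rw [if_neg hcond]
        apply ih (i - 1) _ (by omega) (by omega) hdot'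
        intro p hp
        rw [hseen p hp]
        have hpne : rlast search p ≠ i := by
          intro h
          have hpc := hne p h
          refine hcond ⟨hpc ▸ hp, ?_⟩
          rw [hpc]
          have h1 := hseen p hp
          rw [if_neg (by omega)] at h1
          exact h1
        split_ifs <;> first | rfl | omega

-- ===== VERDICT (by name: the statement is the Claim_ definition above) =====
theorem find_soft_break_spec : Claim_equal_find_soft_break := by
  intro text max_len min_break _
  unfold Spec_find_soft_break find_soft_break find_soft_break_alt
  by_cases hle : PySem.Str.len text ≤ max_len
  · simp only [if_pos hle]
  · simp only [if_neg hle]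
    set lo := max 1 min_break with hlo
    have hsl : (PySem.Str.slice text none (some (max_len + 1))).toList
        = PySem.List.slice text.toList none (some (max_len + 1)) := by
      simp [PySem.Str.toList_slice]
    set S := PySem.List.slice text.toList none (some (max_len + 1)) with hS
    rw [loopA_eq_refLoop, hsl]
    have hbound : ∀ p, rlast S p < (S.length : Int) := fun p => rlast_lt_length S p
    by_cases hc : lo - 1 ≤ (S.length : Int) - 1
    · refine (scan_spec S max_len min_break lo hlo ((S.length : Int) - 1 - (lo - 1)).toNat
        ((S.length : Int) - 1) PySem.Dict.empty (by omega) (by omega)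
        (by have := hbound '.'; omega) ?_).symm
      intro p _
      rw [PySem.Dict.get?_empty]
      rw [if_neg (by have := hbound p; omega)]
    · rw [PySem.List.pyRange_neg_one_eq_nil (by omega)]
      simp only [fsbScan]
      rw [loop2_eq_refLoop S lo max_len min_break _ _
        (fun p _ => by rw [PySem.Dict.get?_empty, if_neg (by have := hbound p; omega)])]
      simp only [refLoop]
      rw [if_neg (by have := hbound '.'; omega)]
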